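-- pv_equiv track=rewrite | github.com/uclanlp/ProbeGrammarRobustness | generate_error_sent_all.py | change_pos
-- ===== SOURCE A (Python) =====
-- import copy
--
-- def change_pos(modi, ori_p):
--     aft_p = copy.deepcopy(ori_p)
--     for idx, item in enumerate(modi):
--         if item == '2':
--             aft_p = [p + int(p > idx) for p in aft_p]
--         elif item == '3':
--             aft_p = [p - int(p > idx) for p in aft_p]
--     return aft_p
-- ===== SOURCE B (Python) =====
-- def change_pos(modi, ori_p):
--     # Prefix-sum + freeze-point formulation: once a position's current value
--     # drops to <= the current operation index it can never change again
--     # (indices only grow, the value can only grow when above the index).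
--     # After k active steps the value is p + S_k where S_k counts '2' minus '3';
--     # it freezes at the first k with p + S_k <= k, i.e. U_k := k - S_k >= p.
--     # U is nondecreasing (its increments are 0, 1 or 2), so the freeze point
--     # is found by binary search instead of replaying the edit sequence.
--     U = [0]
--     u = 0
--     for item in modi:
--         if item == '2':
--             pass
--         elif item == '3':
--             u += 2
--         else:
--             u += 1
--         U.append(u)
--     m = len(modi)
--     res = []
--     for p in ori_p:
--         lo, hi = 0, m + 1
--         while lo < hi:
--             mid = (lo + hi) // 2
--             if p <= U[mid]:
--                 hi = mid
--             else:
--                 lo = mid + 1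
--         k = lo if lo <= m else m
--         res.append(p + k - U[k])
--     return res
-- ===== Notes on version B (the rewrite author's own statement) =====
-- stated objective: faster
-- what changed: B replaces the replay of the whole edit sequence per position by a precomputed nondecreasing prefix-sum array U (one pass over modi) plus a binary search per position for the 'freeze point' k (the first step index where the tracked value stops moving), returning p + k - U[k]; correctness rests on the invariant that once a value drops to <= the current operation index it never changes again.
import Mathlib
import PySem

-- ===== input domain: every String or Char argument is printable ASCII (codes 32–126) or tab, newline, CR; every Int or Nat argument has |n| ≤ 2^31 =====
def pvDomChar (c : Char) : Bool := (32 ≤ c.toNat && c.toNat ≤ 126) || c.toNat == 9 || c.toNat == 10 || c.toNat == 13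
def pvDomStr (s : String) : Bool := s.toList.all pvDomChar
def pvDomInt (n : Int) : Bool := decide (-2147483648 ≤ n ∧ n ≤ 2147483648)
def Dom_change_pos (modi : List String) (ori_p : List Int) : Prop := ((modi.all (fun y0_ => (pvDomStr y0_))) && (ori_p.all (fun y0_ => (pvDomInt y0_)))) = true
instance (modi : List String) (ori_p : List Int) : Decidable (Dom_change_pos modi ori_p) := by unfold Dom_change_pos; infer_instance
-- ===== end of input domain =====

-- B replaces the per-position replay of the edit sequence by a precomputed prefix-sum
-- array plus a binary search for each position's freeze point (objective: faster).

-- ===== PORT A =====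
def change_pos (modi : List String) (ori_p : List Int) : List Int :=
  (PySem.List.enumerate modi).foldl
    (fun aft_p pr =>
      if pr.2 == "2" then aft_p.map (fun p => p + (if p > pr.1 then 1 else 0))
      else if pr.2 == "3" then aft_p.map (fun p => p - (if p > pr.1 then 1 else 0))
      else aft_p)
    ori_p

-- ===== PORT B =====
-- one iteration of Source B's U-building loop (appends the running total)
def buildStep (st : List Int × Int) (item : String) : List Int × Int :=
  let u := if item == "2" then st.2
           else if item == "3" then st.2 + 2
           else st.2 + 1
  (st.1 ++ [u], u)

-- the while-loop of Source B; U[mid] is in range on every call Source B makes (0 ≤ mid < |U|),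
-- so pyGet? … |>.getD 0 is exact there
def bsearchLoop (U : List Int) (p lo hi : Int) : Int :=
  if h : lo < hi then
    let mid := PySem.Int.floordiv (lo + hi) 2
    if p ≤ (PySem.List.pyGet? U mid).getD 0 then bsearchLoop U p lo mid
    else bsearchLoop U p (mid + 1) hi
  else lo
termination_by (hi - lo).toNat
decreasing_by
  · have _h1 := (PySem.Int.le_floordiv_iff_mul_le (a := lo + hi) (b := 2) (q := lo) (by omega)).mpr (by omega)
    have h2 := (PySem.Int.floordiv_lt_iff_lt_mul (a := lo + hi) (b := 2) (q := hi) (by omega)).mpr (by omega)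
    omega
  · have h1 := (PySem.Int.le_floordiv_iff_mul_le (a := lo + hi) (b := 2) (q := lo) (by omega)).mpr (by omega)
    have h2 := (PySem.Int.floordiv_lt_iff_lt_mul (a := lo + hi) (b := 2) (q := hi) (by omega)).mpr (by omega)
    omega

def change_pos_alt (modi : List String) (ori_p : List Int) : List Int :=
  let U := (modi.foldl buildStep ([0], 0)).1
  let m : Int := modi.length
  ori_p.map (fun p =>
    let lo := bsearchLoop U p 0 (m + 1)
    let k := if lo ≤ m then lo else m
    p + k - (PySem.List.pyGet? U k).getD 0)

-- ===== PRECONDITION & SPEC =====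
def Spec_change_pos (modi : List String) (ori_p : List Int) (out : List Int) : Prop := out = change_pos_alt modi ori_p
instance (modi : List String) (ori_p : List Int) (out : List Int) : Decidable (Spec_change_pos modi ori_p out) := by unfold Spec_change_pos; infer_instance

-- ===== CLAIM (what is proved, stated in full; the proofs are below) =====
def Claim_equal_change_pos : Prop := ∀ (modi : List String) (ori_p : List Int), Dom_change_pos modi ori_p → Spec_change_pos modi ori_p (change_pos modi ori_p)

-- ===== LEMMAS AND PROOFS =====

-- weight of one edit item: U grows by 1 - delta, delta ∈ {+1 for '2', -1 for '3', 0}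
def pvW (s : String) : Int := if s == "2" then 0 else if s == "3" then 2 else 1

-- structural prefix-sum list: pvScanU l = [U_0, …, U_m]
def pvScanU : List String → List Int
  | [] => [0]
  | x :: tl => 0 :: (pvScanU tl).map (· + pvW x)

-- the per-position scalar recursion (A's effect on one position, indices normalised to start at 0)
def pvF : List String → Int → Int
  | [], c => c
  | x :: tl, c =>
    let c' := if x == "2" then c + (if c > 0 then 1 else 0)
              else if x == "3" then c - (if c > 0 then 1 else 0)
              else c
    1 + pvF tl (c' - 1)

theorem pvW_nonneg (s : String) : 0 ≤ pvW s := by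
  unfold pvW; split_ifs <;> omega

theorem pvScanU_length (l : List String) : (pvScanU l).length = l.length + 1 := by
  induction l with
  | nil => rfl
  | cons x tl ih => simp [pvScanU, ih]

theorem pvScanU_nonneg (l : List String) : ∀ a ∈ pvScanU l, 0 ≤ a := by
  induction l with
  | nil => simp [pvScanU]
  | cons x tl ih =>
    simp only [pvScanU, List.mem_cons, List.mem_map]
    rintro a (rfl | ⟨b, hb, rfl⟩)
    · exact le_refl 0
    · have := ih b hb; have := pvW_nonneg x; omega

theorem pvScanU_sorted (l : List String) : (pvScanU l).Pairwise (· ≤ ·) := by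
  induction l with
  | nil => simp [pvScanU]
  | cons x tl ih =>
    refine List.pairwise_cons.mpr ⟨?_, ?_⟩
    · intro a ha
      rcases List.mem_map.mp ha with ⟨b, hb, rfl⟩
      have := pvScanU_nonneg tl b hb; have := pvW_nonneg x; omega
    · exact List.Pairwise.map _ (fun {a b} h => by omega) ih

-- monotone access through getD (proof-free indexing for the binary-search argument)
theorem pairwise_le_getD (U : List Int) (hs : U.Pairwise (· ≤ ·))
    (i j : Nat) (hij : i ≤ j) (hj : j < U.length) :
    U.getD i 0 ≤ U.getD j 0 := by
  rcases eq_or_lt_of_le hij with rfl | h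
  · exact le_refl _
  · rw [List.getD_eq_getElem _ _ (by omega), List.getD_eq_getElem _ _ hj]
    exact List.pairwise_iff_getElem.mp hs i j (by omega) hj h

-- A's foldl over the list of positions is the map of the scalar foldl
theorem foldl_map_comm (l : List (Int × String)) (xs : List Int)
    (f : Int → Int × String → Int) :
    l.foldl (fun (acc : List Int) pr => acc.map (fun p => f p pr)) xs
      = xs.map (fun p => l.foldl f p) := by
  induction l generalizing xs with
  | nil => simp
  | cons hd tl ih => simp [List.foldl_cons, ih, List.map_map]

-- the scalar foldl over enumerate … s equals the index-normalised recursion pvF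
theorem scalar_foldl_eq_pvF (l : List String) : ∀ (s c : Int),
    (PySem.List.enumerate l s).foldl
      (fun cur pr =>
        if pr.2 == "2" then cur + (if cur > pr.1 then 1 else 0)
        else if pr.2 == "3" then cur - (if cur > pr.1 then 1 else 0)
        else cur) c
      = s + pvF l (c - s) := by
  induction l with
  | nil => intro s c; simp only [PySem.List.enumerate_nil, List.foldl_nil, pvF]; ring
  | cons x tl ih =>
    intro s c
    rw [PySem.List.enumerate_cons, List.foldl_cons, ih]
    simp only [pvF]
    have e1 : (if c > s then (1:ℤ) else 0) = (if c - s > 0 then 1 else 0) := by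
      by_cases h : c > s
      · rw [if_pos h, if_pos (by omega)]
      · rw [if_neg h, if_neg (by omega)]
    by_cases h2 : x == "2"
    · simp only [h2, if_true, e1]
      by_cases hp : c - s > 0
      · rw [if_pos hp, show c + 1 - (s + 1) = c - s + 1 - 1 from by ring]; ring
      · rw [if_neg hp, show c + 0 - (s + 1) = c - s + 0 - 1 from by ring]; ring
    · by_cases h3 : x == "3"
      · simp only [h2, h3, Bool.false_eq_true, if_false, if_true, e1]
        by_cases hp : c - s > 0
        · rw [if_pos hp, show c - 1 - (s + 1) = c - s - 1 - 1 from by ring]; ring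
        · rw [if_neg hp, show c - 0 - (s + 1) = c - s - 0 - 1 from by ring]; ring
      · simp only [h2, h3, Bool.false_eq_true, if_false]
        rw [show c - (s + 1) = c - s - 1 from by ring]; ring

-- freeze: a value at or below the current index never moves again
theorem pvF_frozen (l : List String) : ∀ c : Int, c ≤ 0 → pvF l c = c := by
  induction l with
  | nil => intro c _; rfl
  | cons x tl ih =>
    intro c hc
    simp only [pvF]
    have hnp : ¬ (c > 0) := by omega
    have hstep : (if x == "2" then c + (if c > 0 then 1 else 0)
            else if x == "3" then c - (if c > 0 then 1 else 0) else c) = c := by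
      rw [if_neg hnp]; split_ifs <;> ring
    rw [hstep, ih (c - 1) (by omega)]
    ring

-- closed form: pvF l c = c + k - U_k with k the first index of U = pvScanU l with c ≤ U_k, clamped
theorem pvF_closed (l : List String) : ∀ c : Int,
    pvF l c =
      c + ((min ((pvScanU l).findIdx (fun u => decide (c ≤ u))) l.length : Nat) : Int)
        - (pvScanU l).getD (min ((pvScanU l).findIdx (fun u => decide (c ≤ u))) l.length) 0 := by
  induction l with
  | nil =>
    intro c
    simp only [pvF, pvScanU, List.length_nil, Nat.min_zero, Nat.cast_zero, List.getD_cons_zero]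
    omega
  | cons x tl ih =>
    intro c
    by_cases hc : c ≤ 0
    · -- frozen: head of pvScanU is 0 and c ≤ 0, so findIdx = 0
      rw [pvF_frozen _ c hc]
      have h0 : (pvScanU (x :: tl)).findIdx (fun u => decide (c ≤ u)) = 0 := by
        simp [pvScanU, List.findIdx_cons, hc]
      rw [h0]
      simp only [Nat.zero_min, Nat.cast_zero, pvScanU, List.getD_cons_zero]
      omega
    · -- active: first step applies, recurse with c - pvW x
      have hpos : c > 0 := by omega
      have hstep : pvF (x :: tl) c = 1 + pvF tl (c - pvW x) := by
        simp only [pvF, if_pos hpos, pvW]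
        by_cases h2 : x == "2"
        · rw [if_pos h2, if_pos h2, show c + 1 - 1 = c - 0 from by ring]
        · by_cases h3 : x == "3"
          · rw [if_neg h2, if_neg h2, if_pos h3, if_pos h3,
                show c - 1 - 1 = c - 2 from by ring]
          · rw [if_neg h2, if_neg h2, if_neg h3, if_neg h3,
                show c - 1 = c - 1 from rfl]
      rw [hstep, ih (c - pvW x)]
      have hhead : (decide (c ≤ (0:Int))) = false := by
        simp only [decide_eq_false_iff_not]; omega
      have hfmap : ((pvScanU tl).map (· + pvW x)).findIdx (fun u => decide (c ≤ u))
          = (pvScanU tl).findIdx (fun u => decide (c - pvW x ≤ u)) := by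
        rw [List.findIdx_map]
        congr 1
        funext u
        simp only [Function.comp, decide_eq_decide]
        omega
      have hfi : (pvScanU (x :: tl)).findIdx (fun u => decide (c ≤ u))
          = (pvScanU tl).findIdx (fun u => decide (c - pvW x ≤ u)) + 1 := by
        simp only [pvScanU, List.findIdx_cons, hhead, cond_false, hfmap]
      rw [hfi]
      set k' := (pvScanU tl).findIdx (fun u => decide (c - pvW x ≤ u)) with hk'
      have hk'le : k' ≤ (pvScanU tl).length := List.findIdx_le_length
      have hlen : (pvScanU tl).length = tl.length + 1 := pvScanU_length tl
      have hmin : min (k' + 1) (x :: tl).length = min k' tl.length + 1 := by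
        simp only [List.length_cons]; omega
      rw [hmin]
      have hidx : min k' tl.length < (pvScanU tl).length := by omega
      have hgetD : (pvScanU (x :: tl)).getD (min k' tl.length + 1) 0
          = (pvScanU tl).getD (min k' tl.length) 0 + pvW x := by
        simp only [pvScanU, List.getD_cons_succ]
        rw [List.getD_eq_getElem _ _ (by simpa using hidx), List.getD_eq_getElem _ _ hidx]
        simp
      rw [hgetD]
      push_cast
      ring

-- binary-search correctness: with the first-hit index F between lo and hi and U sorted,
-- the loop returns F
theorem bsearchLoop_eq (U : List Int) (p : Int) (hs : U.Pairwise (· ≤ ·)) :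
    ∀ (n : Nat) (lo hi : Int), (hi - lo).toNat ≤ n → 0 ≤ lo → lo ≤ hi → hi ≤ U.length →
    lo ≤ (U.findIdx (fun u => decide (p ≤ u)) : Int) →
    (U.findIdx (fun u => decide (p ≤ u)) : Int) ≤ hi →
    bsearchLoop U p lo hi = U.findIdx (fun u => decide (p ≤ u)) := by
  intro n
  induction n with
  | zero =>
    intro lo hi hn h0 hlh _ hF1 hF2
    have : lo = hi := by omega
    rw [bsearchLoop]
    simp only [this, lt_irrefl, dite_false]
    omega
  | succ n ih =>
    intro lo hi hn h0 hlh hhi hF1 hF2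
    rw [bsearchLoop]
    by_cases h : lo < hi
    · simp only [h, dite_true]
      have hm1 := (PySem.Int.le_floordiv_iff_mul_le (a := lo + hi) (b := 2) (q := lo) (by omega)).mpr (by omega)
      have hm2 := (PySem.Int.floordiv_lt_iff_lt_mul (a := lo + hi) (b := 2) (q := hi) (by omega)).mpr (by omega)
      set mid := PySem.Int.floordiv (lo + hi) 2 with hmiddef
      have hmidlen : mid < (U.length : Int) := by omega
      have hget : (PySem.List.pyGet? U mid).getD 0 = U.getD mid.toNat 0 := by
        rw [PySem.List.pyGet?_eq_some_getElem U (i := mid) (by omega) hmidlen]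
        rw [List.getD_eq_getElem _ _ (by omega)]
        rfl
      by_cases hcmp : p ≤ (PySem.List.pyGet? U mid).getD 0
      · rw [if_pos hcmp]
        rw [hget] at hcmp
        -- predicate holds at mid, so F ≤ mid
        have hFmid : (U.findIdx (fun u => decide (p ≤ u)) : Int) ≤ mid := by
          by_contra hgt
          push_neg at hgt
          have hlt : mid.toNat < U.findIdx (fun u => decide (p ≤ u)) := by omega
          have hfalse := List.not_of_lt_findIdx hlt
          rw [List.getD_eq_getElem _ _ (by omega)] at hcmp
          simp only [decide_eq_false_iff_not] at hfalse
          exact hfalse hcmp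
        exact ih lo mid (by omega) h0 (by omega) (by omega) hF1 hFmid
      · rw [if_neg hcmp]
        push_neg at hcmp
        rw [hget] at hcmp
        -- U[mid] < p and U sorted: predicate fails at every i ≤ mid, so mid < F
        have hFgt : mid < (U.findIdx (fun u => decide (p ≤ u)) : Int) := by
          by_contra hle
          push_neg at hle
          set F := U.findIdx (fun u => decide (p ≤ u)) with hFdef
          have hFlen : F < U.length := by omega
          have hsat2 : p ≤ U.getD F 0 := by
            rw [List.getD_eq_getElem U 0 hFlen]
            have hsat := List.findIdx_getElem (p := fun u => decide (p ≤ u)) (xs := U)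
              (w := by rw [← hFdef]; exact hFlen)
            simp only [decide_eq_true_eq] at hsat
            exact hsat
          have hmono : U.getD F 0 ≤ U.getD mid.toNat 0 :=
            pairwise_le_getD U hs F mid.toNat (by omega) (by omega)
          omega
        exact ih (mid + 1) hi (by omega) (by omega) (by omega) hhi (by omega) hF2
    · rw [dif_neg h]
      omega

-- Source B's U-building foldl computes pvScanU
theorem buildStep_eq (acc : List Int) (u : Int) (x : String) :
    buildStep (acc, u) x = (acc ++ [u + pvW x], u + pvW x) := by
  unfold buildStep pvW
  split_ifs <;> norm_num

def pvScanL (u : Int) : List String → List Int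
  | [] => []
  | x :: tl => (u + pvW x) :: pvScanL (u + pvW x) tl

theorem buildU_general (l : List String) : ∀ (acc : List Int) (u : Int),
    l.foldl buildStep (acc, u)
      = (acc ++ pvScanL u l, u + (l.map pvW).sum) := by
  induction l with
  | nil => intro acc u; simp [pvScanL]
  | cons x tl ih =>
    intro acc u
    rw [List.foldl_cons, buildStep_eq, ih]
    refine Prod.ext ?_ ?_
    · simp [pvScanL, List.append_assoc]
    · simp only [List.map_cons, List.sum_cons]
      ring

theorem cons_pvScanL_eq (l : List String) : ∀ u : Int,
    u :: pvScanL u l = (pvScanU l).map (· + u) := by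
  induction l with
  | nil => intro u; simp [pvScanL, pvScanU]
  | cons x tl ih =>
    intro u
    simp only [pvScanL, pvScanU, List.map_cons, List.map_map]
    rw [show (0:ℤ) + u = u from by ring]
    congr 1
    rw [show ((· + u) ∘ (· + pvW x)) = (fun a => a + (u + pvW x)) from by
          funext a; simp only [Function.comp]; ring]
    exact ih (u + pvW x)

theorem buildU_eq (l : List String) :
    (l.foldl buildStep ([0], 0)).1 = pvScanU l := by
  rw [buildU_general]
  show 0 :: pvScanL 0 l = pvScanU l
  rw [cons_pvScanL_eq]
  simp

-- ===== VERDICT (by name: the statement is the Claim_ definition above) =====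
theorem change_pos_spec : Claim_equal_change_pos := by
  intro modi ori_p _
  unfold Spec_change_pos change_pos change_pos_alt
  have hA : (fun (aft_p : List Int) (pr : Int × String) =>
      if pr.2 == "2" then aft_p.map (fun p => p + (if p > pr.1 then 1 else 0))
      else if pr.2 == "3" then aft_p.map (fun p => p - (if p > pr.1 then 1 else 0))
      else aft_p)
    = (fun (aft_p : List Int) (pr : Int × String) => aft_p.map (fun p =>
        if pr.2 == "2" then p + (if p > pr.1 then 1 else 0)
        else if pr.2 == "3" then p - (if p > pr.1 then 1 else 0)
        else p)) := by
    funext aft_p pr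
    by_cases h2 : pr.2 == "2" <;> by_cases h3 : pr.2 == "3" <;> simp [h2, h3]
  rw [hA, foldl_map_comm, buildU_eq]
  apply List.map_congr_left
  intro p _
  rw [scalar_foldl_eq_pvF modi 0 p]
  set U := pvScanU modi with hU
  set F := U.findIdx (fun u => decide (p ≤ u)) with hF
  have hlen : U.length = modi.length + 1 := pvScanU_length modi
  have hFle : F ≤ U.length := List.findIdx_le_length
  have hb : bsearchLoop U p 0 ((modi.length : Int) + 1) = F := by
    apply bsearchLoop_eq U p (pvScanU_sorted modi) ((modi.length : Int) + 1 - 0).toNat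
    all_goals omega
  rw [hb]
  change 0 + pvF modi (p - 0)
      = p + (if (F : Int) ≤ (modi.length : Int) then (F : Int) else (modi.length : Int))
          - (PySem.List.pyGet? U
              (if (F : Int) ≤ (modi.length : Int) then (F : Int) else (modi.length : Int))).getD 0
  have hk : (if (F : Int) ≤ (modi.length : Int) then (F : Int) else (modi.length : Int))
      = ((min F modi.length : Nat) : Int) := by
    split_ifs with h <;> (push_cast; omega)
  rw [hk]
  have hkb : min F modi.length < U.length := by omega
  have hget : (PySem.List.pyGet? U ((min F modi.length : Nat) : Int)).getD 0
      = U.getD (min F modi.length) 0 := by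
    rw [PySem.List.pyGet?_eq_some_getElem U (i := ((min F modi.length : Nat) : Int)) (by omega) (by omega)]
    rw [List.getD_eq_getElem _ _ (by omega)]
    simp only [Option.getD_some]
    congr 1
  rw [hget]
  have hcf := pvF_closed modi p
  simp only [← hU, ← hF] at hcf
  rw [show p - 0 = p from by ring, hcf]
  ring
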